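-- pv_equiv track=rewrite | github.com/sean578/advent_of_code | 2015/20/20.py | sum_of_factors
-- ===== SOURCE A (Python) =====
-- def prime_factors(nr):
--     i = 2
--     factors = []
--     while i <= nr:
--         if (nr % i) == 0:
--             factors.append(i)
--             nr = nr / i
--         else:
--             i = i + 1
--     return factors
--
-- def sum_of_factors(prime_factors):
--     prime_factor_dict = {}
--     for factor in prime_factors:
--         prime_factor_dict[factor] = prime_factors.count(factor)
--
--     factor_sum = 1
--     for key, value in prime_factor_dict.items():
--         sum = 0
--         for i in range(value+1):
--             sum = sum + key**i
--         factor_sum = factor_sum * sum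
--
--     return factor_sum
-- ===== SOURCE B (Python) =====
-- def sum_of_factors(prime_factors):
--     # Tally multiplicities in one pass, then multiply closed-form geometric sums.
--     counts = {}
--     for p in prime_factors:
--         counts[p] = counts.get(p, 0) + 1
--     total = 1
--     for p, v in counts.items():
--         total *= v + 1 if p == 1 else (p ** (v + 1) - 1) // (p - 1)
--     return total
-- ===== Notes on version B (the rewrite author's own statement) =====
-- stated objective: faster
-- what changed: B tallies each factor's multiplicity in a single pass with a dict (replacing A's per-element list.count scans) and replaces A's inner power-summing loop with the closed-form geometric sum (p**(v+1)-1)//(p-1) (v+1 when p==1).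
import Mathlib
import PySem

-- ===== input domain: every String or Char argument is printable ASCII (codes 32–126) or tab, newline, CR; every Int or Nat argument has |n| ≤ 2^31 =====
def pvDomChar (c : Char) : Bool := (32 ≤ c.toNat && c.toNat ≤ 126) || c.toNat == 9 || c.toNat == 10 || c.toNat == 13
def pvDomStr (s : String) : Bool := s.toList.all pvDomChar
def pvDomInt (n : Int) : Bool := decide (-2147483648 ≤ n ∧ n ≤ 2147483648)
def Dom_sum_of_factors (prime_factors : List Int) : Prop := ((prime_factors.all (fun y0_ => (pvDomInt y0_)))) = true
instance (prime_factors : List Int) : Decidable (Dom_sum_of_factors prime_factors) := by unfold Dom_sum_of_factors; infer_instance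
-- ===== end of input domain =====

-- B tallies multiplicities in one pass and multiplies closed-form geometric sums, instead of
-- A's repeated list.count calls and an inner power-summing loop.

-- ===== PORT A =====
-- A: build dict factor -> prime_factors.count(factor), then multiply the inner loop sums
-- sum_{i in range(value+1)} key**i.  key**i is ported as k ^ i.toNat, exact since every i
-- produced by range(value+1) is nonnegative (value = a count >= 1).
def sum_of_factors (prime_factors : List Int) : Int :=
  (prime_factors.foldl
      (fun acc factor => acc.insert factor ((PySem.List.count prime_factors factor : Nat) : Int))
      (PySem.Dict.empty : PySem.Dict Int Int)).items.foldl
    (fun factor_sum kv =>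
      factor_sum *
        ((PySem.List.pyRange 0 (kv.2 + 1) 1).foldl (fun s i => s + kv.1 ^ i.toNat) 0))
    1

-- ===== PORT B =====
-- B: counts[p] = counts.get(p, 0) + 1 in one pass, then for each (p, v):
-- total *= v + 1 if p == 1 else (p ** (v + 1) - 1) // (p - 1).
-- p ** (v + 1) is ported as kv.1 ^ (kv.2 + 1).toNat, exact since v = a count >= 1.
def sum_of_factors_alt (prime_factors : List Int) : Int :=
  (prime_factors.foldl (fun d p => d.insert p (d.getD p 0 + 1))
      (PySem.Dict.empty : PySem.Dict Int Int)).items.foldl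
    (fun total kv =>
      total *
        (if kv.1 == 1 then kv.2 + 1
         else PySem.Int.floordiv (kv.1 ^ (kv.2 + 1).toNat - 1) (kv.1 - 1)))
    1

-- ===== PRECONDITION & SPEC =====
def Spec_sum_of_factors (prime_factors : List Int) (out : Int) : Prop := out = sum_of_factors_alt prime_factors
instance (prime_factors : List Int) (out : Int) : Decidable (Spec_sum_of_factors prime_factors out) := by unfold Spec_sum_of_factors; infer_instance

-- ===== CLAIM (what is proved, stated in full; the proofs are below) =====
def Claim_equal_sum_of_factors : Prop := ∀ (prime_factors : List Int), Dom_sum_of_factors prime_factors → Spec_sum_of_factors prime_factors (sum_of_factors prime_factors)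

-- ===== LEMMAS AND PROOFS =====

-- PySem.List.count agrees with Mathlib's List.count.
theorem pv_count_eq (l : List Int) (x : Int) : PySem.List.count l x = List.count x l := by
  rfl

-- A's dict-building loop: when the inserted value depends only on the key, the items list is
-- the first-occurrence-distinct keys paired with their values.
theorem pv_items_foldl_insert (c : Int → Int) (l : List Int) (d : PySem.Dict Int Int)
    (h : d.items = d.keys.map (fun k => (k, c k))) :
    (l.foldl (fun acc f => acc.insert f (c f)) d).items
      = (PySem.Set.update d.keys l).map (fun k => (k, c k)) := by
  induction l generalizing d with
  | nil => simpa [PySem.Set.update] using h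
  | cons x l ih =>
    have hstep : PySem.Set.update d.keys (x :: l) = PySem.Set.update (PySem.Set.add d.keys x) l := rfl
    rw [List.foldl_cons, hstep]
    by_cases hx : x ∈ d.keys
    · have hc : d.contains x = true := by
        rw [PySem.Dict.contains_eq_decide_mem_keys]; simp [hx]
      have hkeys : (d.insert x (c x)).keys = d.keys := PySem.Dict.keys_insert_of_contains d (c x) hc
      have hitems : (d.insert x (c x)).items = d.keys.map (fun k => (k, c k)) := by
        rw [PySem.Dict.items_insert_of_contains d (c x) hc, h, List.map_map]
        apply List.map_congr_left
        intro a _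
        by_cases hax : a = x <;> simp [hax]
      rw [PySem.Set.add_of_mem hx]
      have hres := ih (d.insert x (c x)) (by rw [hitems, hkeys])
      rwa [hkeys] at hres
    · have hc : d.contains x = false := by
        rw [PySem.Dict.contains_eq_decide_mem_keys]; simp [hx]
      have hkeys : (d.insert x (c x)).keys = d.keys ++ [x] := PySem.Dict.keys_insert_of_not_contains d (c x) hc
      have hitems : (d.insert x (c x)).items = (d.keys ++ [x]).map (fun k => (k, c k)) := by
        rw [PySem.Dict.items_insert_of_not_contains d (c x) hc, h]; simp
      rw [PySem.Set.add_of_not_mem hx]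
      have hres := ih (d.insert x (c x)) (by rw [hitems, hkeys])
      rwa [hkeys] at hres

-- the partial geometric sum as A's inner loop computes it
def pvGsum (k : Int) : Nat → Int
  | 0 => 0
  | n + 1 => pvGsum k n + k ^ n

theorem pv_foldl_pyRange_gsum (k : Int) (n : Nat) :
    (PySem.List.pyRange 0 (n : Int) 1).foldl (fun s i => s + k ^ i.toNat) 0 = pvGsum k n := by
  induction n with
  | zero => simp [pvGsum, PySem.List.pyRange]
  | succ m ih =>
    have h1 : ((m + 1 : Nat) : Int) = (m : Int) + 1 := by push_cast; ring
    rw [h1, PySem.List.pyRange_one_succ_right (by positivity), List.foldl_append]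
    simp [pvGsum, ih]

theorem pv_gsum_one (n : Nat) : pvGsum 1 n = n := by
  induction n with
  | zero => rfl
  | succ m ih => simp [pvGsum, ih]

theorem pv_gsum_mul (k : Int) (n : Nat) : (k - 1) * pvGsum k n = k ^ n - 1 := by
  induction n with
  | zero => simp [pvGsum]
  | succ m ih => simp [pvGsum, mul_add, ih, pow_succ]; ring

-- A's inner loop equals B's closed form, for any nonnegative v.
theorem pv_inner_eq (k v : Int) (hv : 0 ≤ v) :
    (PySem.List.pyRange 0 (v + 1) 1).foldl (fun s i => s + k ^ i.toNat) 0
      = (if k == 1 then v + 1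
         else PySem.Int.floordiv (k ^ (v + 1).toNat - 1) (k - 1)) := by
  have h1 : v + 1 = ((v.toNat + 1 : Nat) : Int) := by omega
  rw [h1, pv_foldl_pyRange_gsum]
  by_cases hk : k = 1
  · simp [hk, pv_gsum_one]
  · have hne : (k == 1) = false := by simp [hk]
    rw [hne, if_neg (by simp)]
    have hd : k ^ (((v.toNat + 1 : Nat) : Int)).toNat - 1 = (k - 1) * pvGsum k (v.toNat + 1) := by
      have ht : (((v.toNat + 1 : Nat) : Int)).toNat = v.toNat + 1 := by omega
      rw [ht, pv_gsum_mul]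
    rw [hd]
    have hb : k - 1 ≠ 0 := by omega
    have hmod : PySem.Int.mod ((k - 1) * pvGsum k (v.toNat + 1)) (k - 1) = 0 :=
      (PySem.Int.mod_eq_zero_iff_dvd _ _).mpr ⟨_, rfl⟩
    have hfm := PySem.Int.floordiv_mul_add_mod ((k - 1) * pvGsum k (v.toNat + 1)) (k - 1)
    rw [hmod, add_zero] at hfm
    have hcan : PySem.Int.floordiv ((k - 1) * pvGsum k (v.toNat + 1)) (k - 1) * (k - 1)
        = pvGsum k (v.toNat + 1) * (k - 1) := by rw [hfm]; ring
    exact (mul_right_cancel₀ hb hcan).symm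

-- ===== VERDICT (by name: the statement is the Claim_ definition above) =====
theorem sum_of_factors_spec : Claim_equal_sum_of_factors := by
  intro pf _
  unfold Spec_sum_of_factors sum_of_factors sum_of_factors_alt
  rw [PySem.Dict.foldl_insert_getD_add_one_eq_counter, PySem.Dict.items_counter]
  have hA := pv_items_foldl_insert (fun f => ((PySem.List.count pf f : Nat) : Int)) pf
    PySem.Dict.empty (by rfl)
  rw [PySem.Dict.keys_empty, PySem.Set.update_nil_left] at hA
  rw [hA, List.foldl_map, List.foldl_map]
  apply PySem.List.foldl_congr_mem
  intro acc x _
  simp only [pv_count_eq]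
  exact congrArg (acc * ·) (pv_inner_eq x _ (Int.natCast_nonneg _))
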